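-- pv_equiv track=rewrite | github.com/MrBrantCode/unitest_baseline | mut_generate/mist_train_taco/taco_2040/solution.py | calculate_sum_of_distances
-- ===== SOURCE A (Python) =====
-- def calculate_sum_of_distances(N: int, lengths: list) -> int:
--     f = 0
--     g = 0
--     h = 0
--     m = 1
--     MOD = 1000000007
--
--     for a in lengths:
--         f = (4 * g * (3 * m + 2) + 4 * f + 16 * a * m * m + 12 * a * m + a) % MOD
--         g = (4 * g + m * (3 * h + 8 * a) + 2 * h + 3 * a) % MOD
--         h = (2 * h + 3 * a) % MOD
--         m = (4 * m + 2) % MOD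
--
--     return f
-- ===== SOURCE B (Python) =====
-- def calculate_sum_of_distances(N: int, lengths: list) -> int:
--     # Variation-of-constants: factor out the homogeneous growth (powers of 2 and 4)
--     # with modular inverses and keep weighted prefix sums; m has the closed form
--     # m_k = (5*4^k - 2)/3 mod p, so f_n = 4^n * Sf_n mod p.
--     MOD = 1000000007
--     inv2 = 500000004   # 2^-1 mod MOD
--     inv3 = 333333336   # 3^-1 mod MOD
--     inv4 = 250000002   # 4^-1 mod MOD
--     Sf = Sg = Sh = 0
--     pow2 = pow4 = 1
--     i2 = inv2
--     i4 = inv4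
--     for a in lengths:
--         m = (5 * pow4 - 2) * inv3 % MOD
--         h = pow2 * Sh % MOD
--         g = pow4 * Sg % MOD
--         d = (4 * g * (3 * m + 2) + (16 * m * m + 12 * m + 1) * a) % MOD
--         c = (m * (3 * h + 8 * a) + 2 * h + 3 * a) % MOD
--         Sf = (Sf + d * i4) % MOD
--         Sg = (Sg + c * i4) % MOD
--         Sh = (Sh + 3 * a * i2) % MOD
--         pow2 = 2 * pow2 % MOD
--         pow4 = 4 * pow4 % MOD
--         i2 = i2 * inv2 % MOD
--         i4 = i4 * inv4 % MOD
--     return pow4 * Sf % MOD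
-- ===== Notes on version B (the rewrite author's own statement) =====
-- stated objective: alternative
-- what changed: A folds one fused four-accumulator recurrence; B solves each linear layer by variation of constants: m via its closed form (5*4^k-2)/3 mod p, and h, g, f by dividing out their homogeneous growth (powers of 2 and 4) with precomputed modular inverses and accumulating weighted prefix sums, returning pow4*Sf mod p.
import Mathlib
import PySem

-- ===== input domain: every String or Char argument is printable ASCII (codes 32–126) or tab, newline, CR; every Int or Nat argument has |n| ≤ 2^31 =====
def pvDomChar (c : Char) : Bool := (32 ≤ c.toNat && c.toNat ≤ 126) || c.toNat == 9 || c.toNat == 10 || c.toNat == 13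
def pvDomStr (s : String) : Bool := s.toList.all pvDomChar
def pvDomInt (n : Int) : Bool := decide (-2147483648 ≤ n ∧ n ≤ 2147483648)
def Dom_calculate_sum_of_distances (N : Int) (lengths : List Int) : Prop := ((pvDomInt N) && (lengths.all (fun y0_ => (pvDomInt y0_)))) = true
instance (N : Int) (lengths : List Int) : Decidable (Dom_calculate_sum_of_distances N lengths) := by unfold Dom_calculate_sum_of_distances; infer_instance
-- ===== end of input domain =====

-- B replaces A's fused four-accumulator recurrence by variation of constants: it factors
-- out the homogeneous growth (powers of 2 and 4) with modular inverses, keeps weighted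
-- prefix sums, and uses the closed form m_k = (5*4^k-2)/3 mod p (objective: alternative).

-- ===== PORT A =====
-- loop body: one fused update of (f, g, h, m)
def pvStepA (st : Int × Int × Int × Int) (a : Int) : Int × Int × Int × Int :=
  let f := st.1; let g := st.2.1; let h := st.2.2.1; let m := st.2.2.2
  let MOD : Int := 1000000007
  (PySem.Int.mod (4 * g * (3 * m + 2) + 4 * f + 16 * a * m * m + 12 * a * m + a) MOD,
   PySem.Int.mod (4 * g + m * (3 * h + 8 * a) + 2 * h + 3 * a) MOD,
   PySem.Int.mod (2 * h + 3 * a) MOD,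
   PySem.Int.mod (4 * m + 2) MOD)

def calculate_sum_of_distances (N : Int) (lengths : List Int) : Int :=
  (lengths.foldl pvStepA (0, 0, 0, 1)).1

-- ===== PORT B =====
-- loop body: weighted prefix sums (Sf, Sg, Sh), powers (pow2, pow4), inverse powers (i2, i4)
def pvStepB (st : Int × Int × Int × Int × Int × Int × Int) (a : Int) :
    Int × Int × Int × Int × Int × Int × Int :=
  let Sf := st.1; let Sg := st.2.1; let Sh := st.2.2.1
  let pow2 := st.2.2.2.1; let pow4 := st.2.2.2.2.1
  let i2 := st.2.2.2.2.2.1; let i4 := st.2.2.2.2.2.2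
  let MOD : Int := 1000000007
  let m := PySem.Int.mod ((5 * pow4 - 2) * 333333336) MOD
  let h := PySem.Int.mod (pow2 * Sh) MOD
  let g := PySem.Int.mod (pow4 * Sg) MOD
  let d := PySem.Int.mod (4 * g * (3 * m + 2) + (16 * m * m + 12 * m + 1) * a) MOD
  let c := PySem.Int.mod (m * (3 * h + 8 * a) + 2 * h + 3 * a) MOD
  (PySem.Int.mod (Sf + d * i4) MOD,
   PySem.Int.mod (Sg + c * i4) MOD,
   PySem.Int.mod (Sh + 3 * a * i2) MOD,
   PySem.Int.mod (2 * pow2) MOD,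
   PySem.Int.mod (4 * pow4) MOD,
   PySem.Int.mod (i2 * 500000004) MOD,
   PySem.Int.mod (i4 * 250000002) MOD)

def calculate_sum_of_distances_alt (N : Int) (lengths : List Int) : Int :=
  let st := lengths.foldl pvStepB (0, 0, 0, 1, 1, 500000004, 250000002)
  PySem.Int.mod (st.2.2.2.2.1 * st.1) 1000000007

-- ===== PRECONDITION & SPEC =====
def Spec_calculate_sum_of_distances (N : Int) (lengths : List Int) (out : Int) : Prop := out = calculate_sum_of_distances_alt N lengths
instance (N : Int) (lengths : List Int) (out : Int) : Decidable (Spec_calculate_sum_of_distances N lengths out) := by unfold Spec_calculate_sum_of_distances; infer_instance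

-- ===== CLAIM (what is proved, stated in full; the proofs are below) =====
def Claim_equal_calculate_sum_of_distances : Prop := ∀ (N : Int) (lengths : List Int), Dom_calculate_sum_of_distances N lengths → Spec_calculate_sum_of_distances N lengths (calculate_sum_of_distances N lengths)

-- ===== LEMMAS AND PROOFS =====

theorem pv_mod_cast (x : Int) : ((PySem.Int.mod x 1000000007 : Int) : ZMod 1000000007) = (x : ZMod 1000000007) := by
  rw [PySem.Int.mod_eq_emod_of_pos (by norm_num)]
  exact_mod_cast ZMod.intCast_mod x 1000000007

theorem pv_p : (1000000007 : ZMod 1000000007) = 0 := by decide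

-- the invariant linking A's state to B's state
def pvInv (sA : Int × Int × Int × Int) (sB : Int × Int × Int × Int × Int × Int × Int) : Prop :=
  ((sA.2.2.2 : ZMod 1000000007) = (5 * (sB.2.2.2.2.1 : ZMod 1000000007) - 2) * 333333336) ∧
  ((sA.2.2.1 : ZMod 1000000007) = (sB.2.2.2.1 : ZMod 1000000007) * (sB.2.2.1 : ZMod 1000000007)) ∧
  ((sA.2.1 : ZMod 1000000007) = (sB.2.2.2.2.1 : ZMod 1000000007) * (sB.2.1 : ZMod 1000000007)) ∧
  ((sA.1 : ZMod 1000000007) = (sB.2.2.2.2.1 : ZMod 1000000007) * (sB.1 : ZMod 1000000007)) ∧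
  ((sB.2.2.2.1 : ZMod 1000000007) * (sB.2.2.2.2.2.1 : ZMod 1000000007) = 500000004) ∧
  ((sB.2.2.2.2.1 : ZMod 1000000007) * (sB.2.2.2.2.2.2 : ZMod 1000000007) = 250000002)

theorem pvInv_step (sA : Int × Int × Int × Int) (sB : Int × Int × Int × Int × Int × Int × Int)
    (a : Int) (h : pvInv sA sB) : pvInv (pvStepA sA a) (pvStepB sB a) := by
  obtain ⟨fA, gA, hA, mA⟩ := sA
  obtain ⟨SF, SG, SH, P2, P4, J2, J4⟩ := sB
  obtain ⟨hm, hh, hg, hf, h2, h4⟩ := h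
  simp only [pvInv, pvStepA, pvStepB] at *
  push_cast [pv_mod_cast]
  refine ⟨?_, ?_, ?_, ?_, ?_, ?_⟩
  · linear_combination 4 * hm - 2 * pv_p
  · linear_combination 2 * hh - 6 * (a : ZMod 1000000007) * h2 - 3 * (a : ZMod 1000000007) * pv_p
  · linear_combination 4 * hg + (3 * (hA : ZMod 1000000007) + 8 * (a : ZMod 1000000007)) * hm
      + (3 * ((5 * (P4 : ZMod 1000000007) - 2) * 333333336) + 2) * hh
      - 4 * (((5 * (P4 : ZMod 1000000007) - 2) * 333333336) * (3 * ((P2 : ZMod 1000000007) * (SH : ZMod 1000000007)) + 8 * (a : ZMod 1000000007)) + 2 * ((P2 : ZMod 1000000007) * (SH : ZMod 1000000007)) + 3 * (a : ZMod 1000000007)) * h4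
      - (((5 * (P4 : ZMod 1000000007) - 2) * 333333336) * (3 * ((P2 : ZMod 1000000007) * (SH : ZMod 1000000007)) + 8 * (a : ZMod 1000000007)) + 2 * ((P2 : ZMod 1000000007) * (SH : ZMod 1000000007)) + 3 * (a : ZMod 1000000007)) * pv_p
  · linear_combination 4 * hf + (12 * (mA : ZMod 1000000007) + 8) * hg
      + (12 * ((P4 : ZMod 1000000007) * (SG : ZMod 1000000007)) + 16 * (a : ZMod 1000000007) * ((mA : ZMod 1000000007) + ((5 * (P4 : ZMod 1000000007) - 2) * 333333336)) + 12 * (a : ZMod 1000000007)) * hm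
      - 4 * (4 * ((P4 : ZMod 1000000007) * (SG : ZMod 1000000007)) * (3 * ((5 * (P4 : ZMod 1000000007) - 2) * 333333336) + 2) + (16 * ((5 * (P4 : ZMod 1000000007) - 2) * 333333336) * ((5 * (P4 : ZMod 1000000007) - 2) * 333333336) + 12 * ((5 * (P4 : ZMod 1000000007) - 2) * 333333336) + 1) * (a : ZMod 1000000007)) * h4
      - (4 * ((P4 : ZMod 1000000007) * (SG : ZMod 1000000007)) * (3 * ((5 * (P4 : ZMod 1000000007) - 2) * 333333336) + 2) + (16 * ((5 * (P4 : ZMod 1000000007) - 2) * 333333336) * ((5 * (P4 : ZMod 1000000007) - 2) * 333333336) + 12 * ((5 * (P4 : ZMod 1000000007) - 2) * 333333336) + 1) * (a : ZMod 1000000007)) * pv_p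
  · linear_combination 1000000008 * h2 + 500000004 * pv_p
  · linear_combination 1000000008 * h4 + 250000002 * pv_p

theorem pvInv_foldl (l : List Int) (sA : Int × Int × Int × Int)
    (sB : Int × Int × Int × Int × Int × Int × Int) (h : pvInv sA sB) :
    pvInv (l.foldl pvStepA sA) (l.foldl pvStepB sB) := by
  induction l generalizing sA sB with
  | nil => exact h
  | cons a t ih => exact ih _ _ (pvInv_step _ _ _ h)

theorem pvA_reduced (l : List Int) (s : Int × Int × Int × Int) (hs : s.1 % 1000000007 = s.1) :
    (l.foldl pvStepA s).1 % 1000000007 = (l.foldl pvStepA s).1 := by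
  induction l generalizing s with
  | nil => exact hs
  | cons a t ih =>
      refine ih _ ?_
      simp only [pvStepA]
      rw [PySem.Int.mod_eq_emod_of_pos (by norm_num)]
      exact Int.emod_emod_of_dvd _ dvd_rfl

-- ===== VERDICT (by name: the statement is the Claim_ definition above) =====
theorem calculate_sum_of_distances_spec : Claim_equal_calculate_sum_of_distances := by
  intro N lengths _
  unfold Spec_calculate_sum_of_distances calculate_sum_of_distances calculate_sum_of_distances_alt
  have hinv : pvInv (lengths.foldl pvStepA (0, 0, 0, 1))
      (lengths.foldl pvStepB (0, 0, 0, 1, 1, 500000004, 250000002)) := by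
    refine pvInv_foldl _ _ _ ?_
    unfold pvInv
    refine ⟨?_, by push_cast; ring, by push_cast; ring, by push_cast; ring, by push_cast; ring, by push_cast; ring⟩
    · push_cast
      linear_combination -pv_p
  obtain ⟨-, -, -, hf, -, -⟩ := hinv
  set rA := lengths.foldl pvStepA (0, 0, 0, 1) with hrA
  set rB := lengths.foldl pvStepB (0, 0, 0, 1, 1, 500000004, 250000002) with hrB
  have hcast : ((rA.1 : Int) : ZMod 1000000007) = ((rB.2.2.2.2.1 * rB.1 : Int) : ZMod 1000000007) := by
    push_cast; exact hf
  have hmod : rA.1 % 1000000007 = (rB.2.2.2.2.1 * rB.1) % 1000000007 := by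
    have := (ZMod.intCast_eq_intCast_iff _ _ _).1 hcast
    exact this
  rw [PySem.Int.mod_eq_emod_of_pos (by norm_num)]
  rw [← hmod]
  exact (pvA_reduced lengths _ (by norm_num)).symm
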